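-- pv_equiv track=rewrite | github.com/JohnAlex2023/afe-backend | scripts/test_endpoint_simulado.py | _normalizar_nit
-- ===== SOURCE A (Python) =====
-- def _normalizar_nit(nit: str) -> str:
--     """Copia exacta de la función en el endpoint"""
--     if not nit:
--         return ""
--     if "-" in nit:
--         nit_principal = nit.split("-")[0]
--     else:
--         nit_principal = nit
--     nit_limpio = nit_principal.replace(".", "").replace(" ", "")
--     nit_solo_digitos = "".join(c for c in nit_limpio if c.isdigit())
--     return nit_solo_digitos
-- ===== SOURCE B (Python) =====
-- def _normalizar_nit(nit: str) -> str:
--     if not nit: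
--         return ""
--     out = []
--     for c in nit:
--         if c == "-":
--             break
--         if c.isdigit():
--             out.append(c)
--     return "".join(out)
-- ===== Notes on version B (the rewrite author's own statement) =====
-- stated objective: simpler
-- what changed: Replaces the split/replace/replace/comprehension pipeline (three intermediate strings) with one early-terminating scan that stops at the first dash and collects digits directly.
import Mathlib
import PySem

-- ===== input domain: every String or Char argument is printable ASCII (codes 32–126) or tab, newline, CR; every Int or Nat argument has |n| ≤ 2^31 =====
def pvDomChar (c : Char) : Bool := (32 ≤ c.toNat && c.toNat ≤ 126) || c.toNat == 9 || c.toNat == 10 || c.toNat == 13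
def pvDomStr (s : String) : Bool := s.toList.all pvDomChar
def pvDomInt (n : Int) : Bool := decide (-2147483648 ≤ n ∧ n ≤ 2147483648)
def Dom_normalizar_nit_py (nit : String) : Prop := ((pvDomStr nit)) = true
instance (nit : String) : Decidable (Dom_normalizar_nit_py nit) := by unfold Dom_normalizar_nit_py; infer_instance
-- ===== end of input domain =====

-- B replaces A's split/replace/replace/filter pipeline by one early-terminating scan (break at '-', collect digits); same result, simpler.


-- ===== PORT A =====
-- literal transliteration of A: empty guard; split("-")[0] if "-" present; strip "." and " " with replace; keep digits and join.
def normalizar_nit_py (nit : String) : String :=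
  if nit = "" then ""
  else
    let s := nit.toList
    let nit_principal :=
      if PySem.Chars.isIn ['-'] s then
        -- nit.split("-")[0]; the split list is always nonempty, so index 0 never raises
        (PySem.List.pyGet? (PySem.Chars.splitOn s ['-']) 0).getD []
      else s
    let nit_limpio := PySem.Chars.replace (PySem.Chars.replace nit_principal ['.'] []) [' '] []
    String.mk (PySem.Chars.join [] ((nit_limpio.filter PySem.Chars.isdigit).map (fun c => [c])))

-- ===== PORT B =====
-- the single scan of Source B: break on '-', append digits
def pvScan : List Char → List Char
  | [] => []
  | c :: rest => if c = '-' then [] else if PySem.Chars.isdigit c then c :: pvScan rest else pvScan rest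

def normalizar_nit_py_alt (nit : String) : String :=
  if nit = "" then "" else String.mk (pvScan nit.toList)

-- ===== PRECONDITION & SPEC =====
def Spec_normalizar_nit_py (nit : String) (out : String) : Prop := out = normalizar_nit_py_alt nit
instance (nit : String) (out : String) : Decidable (Spec_normalizar_nit_py nit out) := by unfold Spec_normalizar_nit_py; infer_instance

-- ===== CLAIM (what is proved, stated in full; the proofs are below) =====
def Claim_equal_normalizar_nit_py : Prop := ∀ (nit : String), Dom_normalizar_nit_py nit → Spec_normalizar_nit_py nit (normalizar_nit_py nit)

-- ===== LEMMAS AND PROOFS =====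

-- splitOn.go's accumulator is a reversed prefix of the result
theorem splitOn_go_acc (fuel : Nat) : ∀ (l cur : List Char) (acc : List (List Char)) (sep : List Char),
    PySem.Chars.splitOn.go sep fuel l cur acc = acc.reverse ++ PySem.Chars.splitOn.go sep fuel l cur [] := by
  induction fuel with
  | zero =>
    intro l cur acc sep
    rw [PySem.Chars.splitOn.go.eq_def]
    conv_rhs => rw [PySem.Chars.splitOn.go.eq_def]
    simp
  | succ f ih =>
    intro l cur acc sep
    cases l with
    | nil =>
      rw [PySem.Chars.splitOn.go.eq_def]
      conv_rhs => rw [PySem.Chars.splitOn.go.eq_def]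
      simp
    | cons c rest =>
      rw [PySem.Chars.splitOn.go.eq_def]
      conv_rhs => rw [PySem.Chars.splitOn.go.eq_def]
      simp only
      split
      · rw [ih (List.drop sep.length (c :: rest)) [] (cur.reverse :: acc),
            ih (List.drop sep.length (c :: rest)) [] (cur.reverse :: [])]
        simp
      · exact ih _ _ _ _

-- the first piece of splitOn on a one-char separator is the takeWhile prefix
theorem splitOn_go_head (l : List Char) (d : Char) :
    ∀ (fuel : Nat) (cur : List Char), l.length ≤ fuel →
    ∃ rest, PySem.Chars.splitOn.go [d] fuel l cur [] =
      (cur.reverse ++ l.takeWhile (· ≠ d)) :: rest := by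
  induction l with
  | nil =>
    intro fuel cur _
    refine ⟨[], ?_⟩
    cases fuel <;> (rw [PySem.Chars.splitOn.go.eq_def]; simp)
  | cons c rest ih =>
    intro fuel cur hle
    cases fuel with
    | zero => simp at hle
    | succ f =>
      rw [PySem.Chars.splitOn.go.eq_def]
      simp only
      by_cases hc : c = d
      · subst hc
        rw [if_pos (by simp [List.isPrefixOf])]
        refine ⟨PySem.Chars.splitOn.go [c] f (List.drop [c].length (c :: rest)) [] [], ?_⟩
        rw [splitOn_go_acc]
        simp [List.takeWhile_cons]
      · have hpf : ([d].isPrefixOf (c :: rest)) = false := by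
          simp [List.isPrefixOf]
          exact fun h => absurd h.symm hc
        rw [if_neg (by simp [hpf])]
        obtain ⟨r, hr⟩ := ih f (c :: cur) (by simpa using hle)
        refine ⟨r, ?_⟩
        rw [hr]
        simp [List.takeWhile_cons, hc]

theorem splitOn_head (l : List Char) (d : Char) :
    ∃ rest, PySem.Chars.splitOn l [d] = (l.takeWhile (· ≠ d)) :: rest := by
  obtain ⟨r, hr⟩ := splitOn_go_head l d (l.length + 1) [] (by omega)
  exact ⟨r, by simpa [PySem.Chars.splitOn] using hr⟩

-- replace with a one-char pattern and empty replacement is filter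
theorem replace_go_filter (d : Char) : ∀ (fuel : Nat) (l acc : List Char), l.length ≤ fuel →
    PySem.Chars.replace.go [d] [] fuel l acc = acc.reverse ++ l.filter (· ≠ d) := by
  intro fuel
  induction fuel with
  | zero =>
    intro l acc h
    have hl : l = [] := by cases l <;> simp_all
    subst hl
    rw [PySem.Chars.replace.go.eq_def]
    simp
  | succ f ih =>
    intro l acc h
    cases l with
    | nil => rw [PySem.Chars.replace.go.eq_def]; simp
    | cons c t =>
      rw [PySem.Chars.replace.go.eq_def]
      simp only
      by_cases hc : c = d
      · subst hc
        rw [if_pos (by simp [List.isPrefixOf])]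
        simp only [List.length_cons, List.length_nil, List.drop_succ_cons, List.drop_zero,
          List.reverse_nil, List.nil_append]
        rw [ih t acc (by simpa using h)]
        simp
      · have hpf : ([d].isPrefixOf (c :: t)) = false := by
          simp [List.isPrefixOf]
          exact fun h => absurd h.symm hc
        rw [if_neg (by simp [hpf])]
        rw [ih t (c :: acc) (by simpa using h)]
        simp [List.filter_cons, hc]

theorem replace_filter (l : List Char) (d : Char) :
    PySem.Chars.replace l [d] [] = l.filter (· ≠ d) := by
  rw [PySem.Chars.replace, if_neg (by simp)]
  exact replace_go_filter d l.length l [] le_rfl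

-- B's scan computes filter-isdigit of the takeWhile prefix
theorem pvScan_eq (l : List Char) :
    pvScan l = (l.takeWhile (· ≠ '-')).filter PySem.Chars.isdigit := by
  induction l with
  | nil => simp [pvScan]
  | cons c rest ih =>
    by_cases hc : c = '-'
    · subst hc; simp [pvScan]
    · simp [pvScan, hc, List.takeWhile_cons, List.filter_cons, ih]

-- a digit is neither '.' nor ' '
theorem digit_ne (a : Char) (hd : PySem.Chars.isdigit a = true) : a ≠ '.' ∧ a ≠ ' ' := by
  constructor <;> (rintro rfl; exact absurd hd (by decide))

-- removing '.' and ' ' does not change which digits survive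
theorem digit_filter (l : List Char) :
    ((l.filter (· ≠ '.')).filter (· ≠ ' ')).filter PySem.Chars.isdigit
      = l.filter PySem.Chars.isdigit := by
  rw [List.filter_filter, List.filter_filter]
  refine List.filter_congr ?_
  intro a _
  by_cases hd : PySem.Chars.isdigit a = true
  · obtain ⟨h1, h2⟩ := digit_ne a hd
    simp [hd, h1, h2]
  · rw [Bool.not_eq_true] at hd
    simp [hd]

-- ===== VERDICT (by name: the statement is the Claim_ definition above) =====
theorem normalizar_nit_py_spec : Claim_equal_normalizar_nit_py := by
  intro nit _
  unfold Spec_normalizar_nit_py normalizar_nit_py normalizar_nit_py_alt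
  by_cases hempty : nit = ""
  · simp [hempty]
  · rw [if_neg hempty, if_neg hempty]
    simp only []
    rw [pvScan_eq]
    by_cases hin : PySem.Chars.isIn ['-'] nit.toList = true
    · rw [if_pos hin]
      obtain ⟨r, hr⟩ := splitOn_head nit.toList '-'
      have hget : (PySem.List.pyGet? (PySem.Chars.splitOn nit.toList ['-']) 0).getD []
          = nit.toList.takeWhile (· ≠ '-') := by
        rw [hr]
        simp [PySem.List.pyGet?, PySem.List.pyIdx?]
      rw [hget, replace_filter, replace_filter, digit_filter,
        PySem.Chars.join_nil_singletons]
    · rw [if_neg hin]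
      have hnomem : '-' ∉ nit.toList := by
        intro hmem
        have hinf : ['-'] <:+: nit.toList := by
          obtain ⟨pre, suf, h⟩ := List.append_of_mem hmem
          exact ⟨pre, suf, by simp [h]⟩
        rw [PySem.Chars.isIn_iff_infix] at hin
        exact hin hinf
      have htw : nit.toList.takeWhile (· ≠ '-') = nit.toList :=
        List.takeWhile_eq_self_iff.mpr (fun c hc => by
          simp only [ne_eq, decide_eq_true_eq]
          rintro rfl
          exact hnomem hc)
      rw [replace_filter, replace_filter, digit_filter,
        PySem.Chars.join_nil_singletons, htw]
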